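-- pv_equiv track=rewrite | github.com/Manish-12/BigData | Python/solution_assgn -1.py | largest
-- ===== SOURCE A (Python) =====
-- def largest(s):
--     ls = s.split()
--     d = {}
--     mx = 0
--     for i in ls:
--         #technique to sort the string
--         val = ''.join(sorted(i))
--         if val in d:
--             d[val] += 1
--         else:
--             d[val] = 1
--         mx = max(mx,d[val])
--     return mx
-- ===== SOURCE B (Python) =====
-- def largest(s):
--     keys = sorted(''.join(sorted(w)) for w in s.split())
--     best = run = 0
--     prev = None
--     for k in keys:
--         run = run + 1 if k == prev else 1
--         prev = k
--         if run > best: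
--             best = run
--     return best
-- ===== Notes on version B (the rewrite author's own statement) =====
-- stated objective: alternative
-- what changed: B sorts the list of anagram keys and finds the longest run of equal adjacent keys in one linear scan, instead of A's hash-map counting with an in-loop running maximum.
import Mathlib
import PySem

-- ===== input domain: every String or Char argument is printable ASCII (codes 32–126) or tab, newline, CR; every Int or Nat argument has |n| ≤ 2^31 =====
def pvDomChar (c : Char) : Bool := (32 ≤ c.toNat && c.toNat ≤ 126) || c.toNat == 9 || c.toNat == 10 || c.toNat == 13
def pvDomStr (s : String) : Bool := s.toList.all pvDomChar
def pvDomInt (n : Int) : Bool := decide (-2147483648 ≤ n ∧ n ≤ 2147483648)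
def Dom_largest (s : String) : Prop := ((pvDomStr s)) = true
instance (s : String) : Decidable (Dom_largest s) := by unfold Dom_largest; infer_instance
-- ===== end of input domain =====

-- B replaces A's dict-counting with in-loop running maximum by sort-then-scan:
-- sort the anagram keys, then one linear scan for the longest run of equal
-- adjacent keys; objective: alternative algorithm of similar cost.

-- shared helper: ''.join(sorted(w)) — join of the sorted 1-char strings is the string of sorted chars
def pvSortKey (w : String) : String := String.ofList (PySem.List.sorted w.toList (fun c => c) false)

-- ===== PORT A =====
-- A's loop body: dict update and running max, branches in A's order
def pvStepA (st : PySem.Dict String Int × Int) (i : String) : PySem.Dict String Int × Int :=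
  let val := pvSortKey i
  let d' := if st.1.contains val then st.1.insert val (st.1.getD val 0 + 1)
            else st.1.insert val 1
  (d', max st.2 (d'.getD val 0))

def largest (s : String) : Int :=
  let ls := PySem.Str.split₀ s
  (ls.foldl pvStepA (PySem.Dict.empty, 0)).2

-- ===== PORT B =====
-- B's loop body over state (best, run, prev)
def pvStepB (st : Int × Int × Option String) (k : String) : Int × Int × Option String :=
  let run := if st.2.2 = some k then st.2.1 + 1 else 1
  let best := if run > st.1 then run else st.1
  (best, run, some k)

def largest_alt (s : String) : Int :=
  let keys := PySem.List.sorted ((PySem.Str.split₀ s).map pvSortKey) (fun x => x) false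
  (keys.foldl pvStepB (0, 0, none)).1

-- ===== PRECONDITION & SPEC =====
def Spec_largest (s : String) (out : Int) : Prop := out = largest_alt s
instance (s : String) (out : Int) : Decidable (Spec_largest s out) := by unfold Spec_largest; infer_instance

-- ===== CLAIM (what is proved, stated in full; the proofs are below) =====
def Claim_equal_largest : Prop := ∀ (s : String), Dom_largest s → Spec_largest s (largest s)

-- ===== LEMMAS AND PROOFS =====

-- the common value: running max over q of the total count in q (0 for empty q)
def pvM (q : List String) : Int := q.foldl (fun m x => max m (List.count x q : Int)) 0

-- upper-bound counterpart of PySem.List.le_foldl_max_int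
lemma pvFoldlMaxLe {β : Type} (xs : List β) (f : β → Int) (init b : Int)
    (h0 : init ≤ b) (h : ∀ x ∈ xs, f x ≤ b) :
    xs.foldl (fun acc y => max acc (f y)) init ≤ b := by
  induction xs generalizing init with
  | nil => simpa using h0
  | cons x t ih =>
      simp only [List.foldl_cons]
      exact ih _ (max_le h0 (h x (by simp))) (fun y hy => h y (by simp [hy]))

-- A's loop body collapses to one insert-and-increment step
lemma pvStepA_eq (d : PySem.Dict String Int) (mx : Int) (w : String) :
    pvStepA (d, mx) w
      = (d.insert (pvSortKey w) (d.getD (pvSortKey w) 0 + 1),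
          max mx (d.getD (pvSortKey w) 0 + 1)) := by
  cases hc : d.contains (pvSortKey w) with
  | false =>
      have hg := PySem.Dict.getD_of_not_contains d (k := pvSortKey w) 0 hc
      simp [pvStepA, hc, hg]
  | true => simp [pvStepA, hc, PySem.Dict.getD_insert_self]

lemma pvM_append (qs : List String) (k : String) :
    pvM (qs ++ [k]) = max (pvM qs) ((List.count k qs : Int) + 1) := by
  unfold pvM
  have hle := PySem.List.le_foldl_max_int (qs ++ [k])
      (fun x => (List.count x (qs ++ [k]) : Int)) 0
  have hle' := PySem.List.le_foldl_max_int qs (fun x => (List.count x qs : Int)) 0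
  have hck : List.count k (qs ++ [k]) = List.count k qs + 1 := by simp
  have hcne : ∀ x, x ≠ k → List.count x (qs ++ [k]) = List.count x qs := by
    intro x hxk
    have h0 : List.count x [k] = 0 := List.count_eq_zero.mpr (by simp [hxk])
    rw [List.count_append, h0, Nat.add_zero]
  apply le_antisymm
  · apply pvFoldlMaxLe
    · exact le_trans hle'.1 (le_max_left _ _)
    · intro x hx
      by_cases hxk : x = k
      · rw [hxk, hck]; push_cast; exact le_max_right _ _
      · rcases List.mem_append.mp hx with hx' | hx'
        · rw [hcne x hxk]
          exact le_trans (hle'.2 x hx') (le_max_left _ _)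
        · simp at hx'; exact absurd hx' hxk
  · apply max_le
    · apply pvFoldlMaxLe
      · exact hle.1
      · intro x hx
        have h1 : (List.count x qs : Int) ≤ (List.count x (qs ++ [k]) : Int) := by
          rw [List.count_append]; push_cast; omega
        exact le_trans h1 (hle.2 x (List.mem_append.mpr (Or.inl hx)))
    · have h2 := hle.2 k (List.mem_append.mpr (Or.inr (by simp)))
      rw [hck] at h2; push_cast at h2 ⊢; exact h2

-- pvM only depends on the multiset of keys
lemma pvM_perm (qs rs : List String) (h : qs.Perm rs) : pvM qs = pvM rs := by
  have hq := PySem.List.le_foldl_max_int qs (fun x => (List.count x qs : Int)) 0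
  have hr := PySem.List.le_foldl_max_int rs (fun x => (List.count x rs : Int)) 0
  apply le_antisymm
  · apply pvFoldlMaxLe
    · exact hr.1
    · intro x hx
      rw [h.count_eq]
      exact hr.2 x (h.mem_iff.mp hx)
  · apply pvFoldlMaxLe
    · exact hq.1
    · intro x hx
      rw [← h.count_eq]
      exact hq.2 x (h.mem_iff.mpr hx)

-- A's dict component is the insert-getD+1 counter fold over the mapped keys
lemma pvA_fst (ls : List String) (d : PySem.Dict String Int) (mx : Int) :
    (ls.foldl pvStepA (d, mx)).1
      = (ls.map pvSortKey).foldl (fun d x => d.insert x (d.getD x 0 + 1)) d := by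
  induction ls generalizing d mx with
  | nil => rfl
  | cons w t ih =>
      simp only [List.foldl_cons, List.map_cons]
      rw [pvStepA_eq]
      exact ih _ _

-- A's running max equals pvM of the key list
lemma pvA_snd (ls : List String) :
    (ls.foldl pvStepA (PySem.Dict.empty, 0)).2 = pvM (ls.map pvSortKey) := by
  induction ls using List.reverseRecOn with
  | nil => rfl
  | append_singleton t w ih =>
      have hfst := pvA_fst t PySem.Dict.empty 0
      rw [PySem.Dict.foldl_insert_getD_add_one_eq_counter] at hfst
      rw [List.foldl_append, List.foldl_cons, List.foldl_nil,
        show (t.foldl pvStepA (PySem.Dict.empty, 0))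
            = ((t.foldl pvStepA (PySem.Dict.empty, 0)).1,
               (t.foldl pvStepA (PySem.Dict.empty, 0)).2) from rfl,
        pvStepA_eq]
      simp only [hfst, ih, PySem.Dict.getD_counter]
      rw [List.map_append, List.map_singleton, pvM_append]

-- on a nondecreasing nonempty list q ++ [k], B's scan state is
-- (pvM (q ++ [k]), count of the last key, the last key)
lemma pvScan_inv (q : List String) (k : String)
    (hp : (q ++ [k]).Pairwise (· ≤ ·)) :
    (q ++ [k]).foldl pvStepB (0, 0, none)
      = (pvM (q ++ [k]), (List.count k (q ++ [k]) : Int), some k) := by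
  induction q using List.reverseRecOn generalizing k with
  | nil =>
      simp [pvStepB, pvM, List.count_singleton]
  | append_singleton t w ih =>
      have hp' : (t ++ [w]).Pairwise (· ≤ ·) :=
        hp.sublist (by simp)
      have hwk : w ≤ k := by
        rcases (List.pairwise_append.mp hp) with ⟨_, _, hrel⟩
        exact hrel w (by simp) k (by simp)
      rw [List.foldl_append (l' := [k]), List.foldl_cons, List.foldl_nil, ih w hp']
      by_cases hke : w = k
      · subst hke
        have hc : List.count w ((t ++ [w]) ++ [w]) = List.count w (t ++ [w]) + 1 := by
          simp
        have hm := pvM_append (t ++ [w]) w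
        have hrunpos := PySem.List.le_foldl_max_int (t ++ [w])
            (fun x => (List.count x (t ++ [w]) : Int)) 0
        simp only [pvStepB, hc, hm]
        push_cast
        have : ∀ a b : Int, (if a + 1 > b then a + 1 else b) = max b (a + 1) := by
          intro a b; split_ifs <;> omega
        rw [this]
      · -- k is strictly above everything, so it does not occur in t ++ [w]
        have hknot : k ∉ t ++ [w] := by
          intro hk
          have hkw : k ≤ w := by
            rcases List.mem_append.mp hk with hk' | hk'
            · rcases (List.pairwise_append.mp hp') with ⟨_, _, hrel⟩
              exact hrel k hk' w (by simp)
            · simp at hk'; exact le_of_eq hk'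
          exact hke (le_antisymm hwk hkw)
        have hc0 : List.count k (t ++ [w]) = 0 := List.count_eq_zero.mpr hknot
        have hkt : k ∉ t := fun h => hknot (List.mem_append.mpr (Or.inl h))
        have hc : List.count k ((t ++ [w]) ++ [k]) = 1 := by
          simp [List.count_append, List.count_eq_zero.mpr hkt, hke]
        have hm := pvM_append (t ++ [w]) k
        rw [hc0] at hm
        have hne : ¬ (some w = some k) := by simpa using hke
        simp only [pvStepB, if_neg hne, hc, hm]
        have : ∀ b : Int, (if (1 : Int) > b then 1 else b) = max b (0 + 1) := by
          intro b; split_ifs <;> omega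
        rw [this]
        norm_num

-- B's scan over the sorted keys equals pvM of the keys
lemma pvB_eq (ks : List String) :
    ((PySem.List.sorted ks (fun x => x) false).foldl pvStepB (0, 0, none)).1
      = pvM ks := by
  have hperm : (PySem.List.sorted ks (fun x => x) false).Perm ks :=
    PySem.List.sorted_perm ks (fun x => x) false
  rcases List.eq_nil_or_concat (PySem.List.sorted ks (fun x => x) false) with h | ⟨q, k, h⟩
  · rw [h]
    have : ks = [] := by
      have := hperm; rw [h] at this; exact this.nil_eq.symm
    rw [this]; rfl
  · rw [List.concat_eq_append] at h
    have hp : (q ++ [k]).Pairwise (· ≤ ·) := by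
      have := PySem.List.sorted_pairwise ks (fun x => x)
      rw [h] at this; exact this
    rw [h, pvScan_inv q k hp]
    rw [h] at hperm
    exact pvM_perm _ _ hperm

-- ===== VERDICT (by name: the statement is the Claim_ definition above) =====
theorem largest_spec : Claim_equal_largest := by
  intro s _
  unfold Spec_largest largest largest_alt
  rw [pvA_snd, pvB_eq]
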